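-- pv_equiv track=rewrite | github.com/anki/cozmo-python-sdk | examples/apps/quizmaster_cozmo.py | create_answer_options_string
-- ===== SOURCE A (Python) =====
-- def create_answer_options_string(list_of_answer_options) -> str:
--     # Build a string that lists all of the answer_options in order.
--     text = "Is it "
--     for i in range(len(list_of_answer_options)):
--         conjunction = ""
--         if i > 0:
--             is_last_option = (i == (len(list_of_answer_options) - 1))
--             conjunction = " or " if is_last_option else ", "
--         text += conjunction + str(i+1) + ": " + list_of_answer_options[i]
--     return text
-- ===== SOURCE B (Python) =====
-- def create_answer_options_string(list_of_answer_options) -> str: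
--     # Build all numbered pieces once, then assemble with a single join
--     # plus last-element handling (instead of a per-iteration conjunction branch).
--     parts = [str(i + 1) + ": " + option
--              for i, option in enumerate(list_of_answer_options)]
--     if not parts:
--         return "Is it "
--     if len(parts) == 1:
--         return "Is it " + parts[0]
--     return "Is it " + ", ".join(parts[:-1]) + " or " + parts[-1]
-- ===== Notes on version B (the rewrite author's own statement) =====
-- stated objective: idiomatic
-- what changed: Replaces the per-iteration conjunction branch inside A's index loop by building the numbered pieces once and assembling with ', '.join over all but the last piece plus ' or ' before the last.
import Mathlib
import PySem

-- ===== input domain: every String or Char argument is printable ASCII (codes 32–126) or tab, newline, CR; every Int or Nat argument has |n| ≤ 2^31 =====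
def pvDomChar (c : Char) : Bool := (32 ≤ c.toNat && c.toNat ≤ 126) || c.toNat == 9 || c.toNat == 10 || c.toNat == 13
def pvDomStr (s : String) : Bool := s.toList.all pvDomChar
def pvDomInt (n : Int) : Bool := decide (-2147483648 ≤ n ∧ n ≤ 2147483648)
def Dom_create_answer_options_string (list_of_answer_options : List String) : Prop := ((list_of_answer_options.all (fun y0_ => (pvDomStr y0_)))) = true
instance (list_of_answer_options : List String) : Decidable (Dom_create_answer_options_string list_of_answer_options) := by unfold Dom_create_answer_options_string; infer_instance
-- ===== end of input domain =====

-- B replaces A's per-iteration conjunction branch by building the numbered pieces once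
-- and assembling them with a single ", "-join plus last-element handling (objective: idiomatic).


-- ===== PORT A =====
def create_answer_options_string (list_of_answer_options : List String) : String :=
  (PySem.List.pyRange 0 (PySem.List.len list_of_answer_options) 1).foldl
    (fun text i =>
      let conjunction : String :=
        if 0 < i then
          (if i = PySem.List.len list_of_answer_options - 1 then " or " else ", ")
        else ""
      text ++ (conjunction ++ PySem.Int.toStr (i + 1) ++ ": " ++
        PySem.List.pyGetD list_of_answer_options i ""))
    "Is it "

-- ===== PORT B =====
def create_answer_options_string_alt (list_of_answer_options : List String) : String :=
  let parts := (PySem.List.enumerate list_of_answer_options).map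
    (fun p => PySem.Int.toStr (p.1 + 1) ++ ": " ++ p.2)
  if parts = [] then "Is it "
  else if parts.length = 1 then "Is it " ++ PySem.List.pyGetD parts 0 ""
  else "Is it " ++ PySem.Str.join ", " (PySem.List.slice parts none (some (-1))) ++
    " or " ++ PySem.List.pyGetD parts (-1) ""

-- ===== PRECONDITION & SPEC =====
def Spec_create_answer_options_string (list_of_answer_options : List String) (out : String) : Prop := out = create_answer_options_string_alt list_of_answer_options
instance (list_of_answer_options : List String) (out : String) : Decidable (Spec_create_answer_options_string list_of_answer_options out) := by unfold Spec_create_answer_options_string; infer_instance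

-- ===== CLAIM (what is proved, stated in full; the proofs are below) =====
def Claim_equal_create_answer_options_string : Prop := ∀ (list_of_answer_options : List String), Dom_create_answer_options_string list_of_answer_options → Spec_create_answer_options_string list_of_answer_options (create_answer_options_string list_of_answer_options)

-- ===== LEMMAS AND PROOFS =====

/-- Plain concatenation of a list of strings. -/
def pvCat (L : List String) : String := L.foldr (· ++ ·) ""

/-- The numbered piece `str(k+1) + ": " + l[k]`. -/
def pvPiece (l : List String) (k : Nat) : String :=
  PySem.Int.toStr ((k : Int) + 1) ++ ": " ++ l.getD k ""

/-- One iteration's contribution in A: conjunction prefix plus the piece. -/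
def pvG (l : List String) (k : Nat) : String :=
  (if 0 < (k : Int) then
    (if (k : Int) = (l.length : Int) - 1 then " or " else ", ") else "") ++
    PySem.Int.toStr ((k : Int) + 1) ++ ": " ++ l.getD k ""

lemma pvCat_append_singleton (xs : List String) (x : String) :
    pvCat (xs ++ [x]) = pvCat xs ++ x := by
  induction xs with
  | nil => simp [pvCat]
  | cons a t ih => simp [pvCat] at ih ⊢; simp [ih, String.append_assoc]

lemma pvFoldl_cat (f : Nat → String) (xs : List Nat) (init : String) :
    xs.foldl (fun a k => a ++ f k) init = init ++ pvCat (xs.map f) := by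
  induction xs generalizing init with
  | nil => simp [pvCat]
  | cons a t ih => simp [pvCat] at ih ⊢; simp [ih, String.append_assoc]

lemma pvA_eq (l : List String) :
    create_answer_options_string l = "Is it " ++ pvCat ((List.range l.length).map (pvG l)) := by
  unfold create_answer_options_string
  rw [PySem.List.pyRange_one]
  simp only [PySem.List.len_eq, sub_zero, Int.toNat_natCast, List.foldl_map, zero_add,
    PySem.List.pyGetD_natCast]
  exact pvFoldl_cat (pvG l) (List.range l.length) "Is it "

lemma pvCJoin_append (s : List Char) (rs : List (List Char)) (x r : List Char) :
    PySem.Chars.join s ((x :: rs) ++ [r]) = PySem.Chars.join s (x :: rs) ++ s ++ r := by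
  induction rs generalizing x with
  | nil => simp [PySem.Chars.join_cons_cons, PySem.Chars.join_singleton]
  | cons y t ih =>
      simp only [List.cons_append, PySem.Chars.join_cons_cons]
      have hih := ih y
      rw [List.cons_append] at hih
      rw [hih]
      simp [List.append_assoc]

lemma pvJoin_singleton (p : String) : PySem.Str.join ", " [p] = p := by
  apply String.ext
  simp [PySem.Str.toList_join, PySem.Chars.join_singleton]

lemma pvJoin_append (qs : List String) (x q : String) :
    PySem.Str.join ", " ((x :: qs) ++ [q]) = PySem.Str.join ", " (x :: qs) ++ ", " ++ q := by
  apply String.ext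
  simp only [PySem.Str.toList_join, List.map_append, List.map_cons, List.map_nil,
    String.toList_append]
  exact pvCJoin_append _ (qs.map String.toList) x.toList q.toList

lemma pvMid (l : List String) : ∀ m : Nat, 1 ≤ m → m + 1 ≤ l.length →
    pvCat ((List.range m).map (pvG l)) = PySem.Str.join ", " ((List.range m).map (pvPiece l)) := by
  intro m
  induction m with
  | zero => omega
  | succ m ih =>
    intro _ hm
    rcases Nat.eq_zero_or_pos m with h0 | hpos
    · subst h0
      simp [List.range_succ, pvCat, pvG, pvPiece, pvJoin_singleton]
    · have hg : pvG l m = ", " ++ pvPiece l m := by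
        have h1 : (0 : Int) < (m : Int) := by exact_mod_cast hpos
        have h2 : ¬ ((m : Int) = (l.length : Int) - 1) := by omega
        rw [pvG, pvPiece, if_pos h1, if_neg h2]
        simp [String.append_assoc]
      obtain ⟨x, qs, hxq⟩ := List.exists_cons_of_ne_nil
        (show (List.range m).map (pvPiece l) ≠ [] by simp; omega)
      rw [List.range_succ, List.map_append, List.map_append, List.map_singleton,
        List.map_singleton, pvCat_append_singleton, ih hpos (by omega), hg, hxq,
        pvJoin_append]
      simp [String.append_assoc]

lemma pvParts_eq (l : List String) :
    (PySem.List.enumerate l).map (fun p => PySem.Int.toStr (p.1 + 1) ++ ": " ++ p.2)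
      = (List.range l.length).map (pvPiece l) := by
  rw [PySem.List.enumerate_eq_map_pyRange l "", PySem.List.pyRange_one]
  simp [List.map_map, Function.comp, pvPiece, PySem.List.pyGetD_natCast]

-- ===== VERDICT (by name: the statement is the Claim_ definition above) =====
theorem create_answer_options_string_spec : Claim_equal_create_answer_options_string := by
  intro l _
  unfold Spec_create_answer_options_string create_answer_options_string_alt
  simp only [pvParts_eq]
  by_cases h0 : l.length = 0
  · rw [pvA_eq, h0]
    simp [pvCat]
  · by_cases h1 : l.length = 1
    · rw [pvA_eq, h1]
      simp [pvCat, pvG, pvPiece, List.range_succ]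
    · have h2 : 2 ≤ l.length := by omega
      have hne : ((List.range l.length).map (pvPiece l)) ≠ [] := by
        simp [List.map_eq_nil_iff, List.range_eq_nil]
        rintro rfl; simp at h2
      have hlen1 : ¬ ((List.range l.length).map (pvPiece l)).length = 1 := by
        simp; omega
      rw [if_neg hne, if_neg hlen1]
      rw [PySem.List.slice_to_neg_one]
      rw [pvA_eq]
      have hr : List.range l.length = List.range (l.length - 1) ++ [l.length - 1] := by
        conv_lhs => rw [show l.length = (l.length - 1) + 1 by omega, List.range_succ]
      rw [hr]
      simp only [List.map_append, List.map_singleton, pvCat_append_singleton,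
        List.dropLast_concat, PySem.List.pyGetD_neg_one_append_singleton]
      rw [pvMid l (l.length - 1) (by omega) (by omega)]
      have hg : pvG l (l.length - 1) = " or " ++ pvPiece l (l.length - 1) := by
        have ha : (0 : Int) < ((l.length - 1 : Nat) : Int) := by
          have : 1 ≤ l.length - 1 := by omega
          exact_mod_cast this
        have hb : ((l.length - 1 : Nat) : Int) = (l.length : Int) - 1 := by omega
        rw [pvG, pvPiece, if_pos ha, if_pos hb]
        simp [String.append_assoc]
      rw [hg]
      simp [String.append_assoc]
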